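-- pv_equiv track=rewrite | github.com/danbriggs/mastermind | mastermind_general_2.py | all_firsts
-- ===== SOURCE A (Python) =====
-- def all_firsts(symbs, to_fill, first_index_max = 0):
--     """Returns a list of all codes that are in alphabetical order and don't skip a letter.
--     These are the only ones necessary to try as a first code."""
--     if to_fill == 0:
--         return [[]]
--     if symbs == []:
--         return [[]]
--     #Only the head symbol or the next symbol may be used in the second place.
--     poss = []
--     for i in range(0,min(len(symbs),first_index_max+1)):
--         poss += [[symbs[i]]+x for x in all_firsts(symbs[i:], to_fill - 1, first_index_max = 1)]
--     return poss
-- ===== SOURCE B (Python) =====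
-- def all_firsts(symbs, to_fill, first_index_max=0):
--     """Iterative re-implementation: grow all index-prefixes layer by layer
--     (each next index is the previous one or the next, staying in range),
--     then map indices to symbols.  Same lexicographic order as the recursion."""
--     if to_fill == 0:
--         return [[]]
--     if symbs == []:
--         return [[]]
--     n = len(symbs)
--     prefixes = [[j] for j in range(min(n, first_index_max + 1))]
--     for _ in range(to_fill - 1):
--         if not prefixes:
--             break
--         prefixes = [p + [p[-1] + b] for p in prefixes for b in (0, 1)
--                     if p[-1] + b < n]
--     return [[symbs[i] for i in p] for p in prefixes]
-- ===== Notes on version B (the rewrite author's own statement) =====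
-- stated objective: alternative
-- what changed: Replaces the self-recursion over list slices by an iterative layer-by-layer breadth-first growth of index prefixes (each next index = previous or previous+1, kept in range), mapping indices to symbols once at the end; same lexicographic output order.
import Mathlib
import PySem

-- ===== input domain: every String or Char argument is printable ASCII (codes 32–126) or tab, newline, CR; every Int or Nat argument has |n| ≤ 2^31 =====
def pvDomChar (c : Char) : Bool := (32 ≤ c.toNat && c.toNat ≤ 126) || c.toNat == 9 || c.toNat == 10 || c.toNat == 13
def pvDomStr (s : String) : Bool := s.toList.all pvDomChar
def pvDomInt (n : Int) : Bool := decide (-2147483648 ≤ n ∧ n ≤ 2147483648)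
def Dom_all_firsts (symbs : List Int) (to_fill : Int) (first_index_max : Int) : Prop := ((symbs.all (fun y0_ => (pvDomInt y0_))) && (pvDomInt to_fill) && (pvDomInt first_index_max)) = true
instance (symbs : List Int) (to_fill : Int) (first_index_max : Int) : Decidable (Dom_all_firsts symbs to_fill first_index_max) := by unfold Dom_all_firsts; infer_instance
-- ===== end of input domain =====

-- B replaces A's recursion over list slices by an iterative layer-by-layer growth of
-- index prefixes; an alternative decomposition of the same enumeration, same output order.

-- ===== PORT A =====
-- fuel = recursion depth; Python's recursion decreases to_fill by 1 each call, so
-- to_fill.toNat + 1 fuel always suffices on inputs where Python returns (the fuel-0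
-- branch is unreachable under Pre_).
def all_firstsAux (fuel : Nat) (symbs : List Int) (to_fill : Int) (first_index_max : Int) : List (List Int) :=
  match fuel with
  | 0 => []
  | fuel' + 1 =>
    if to_fill = 0 then [[]]
    else if symbs = [] then [[]]
    else
      (PySem.List.pyRange 0 (min (symbs.length : Int) (first_index_max + 1)) 1).foldl
        (fun poss i =>
          poss ++ (all_firstsAux fuel' (PySem.List.slice symbs (some i) none) (to_fill - 1) 1).map
            (fun x => PySem.List.pyGetD symbs i 0 :: x)) []

def all_firsts (symbs : List Int) (to_fill : Int) (first_index_max : Int) : List (List Int) :=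
  all_firstsAux (to_fill.toNat + 1) symbs to_fill first_index_max

-- ===== PORT B =====
-- one layer of the comprehension: [p + [p[-1]+b] for p in prefixes for b in (0,1) if p[-1]+b < n]
def altExtend (n : Int) (prefixes : List (List Int)) : List (List Int) :=
  prefixes.flatMap (fun p =>
    ([0, 1] : List Int).filterMap (fun b =>
      if PySem.List.pyGetD p (-1) 0 + b < n then some (p ++ [PySem.List.pyGetD p (-1) 0 + b])
      else none))

def all_firsts_alt (symbs : List Int) (to_fill : Int) (first_index_max : Int) : List (List Int) :=
  if to_fill = 0 then [[]]
  else if symbs = [] then [[]]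
  else
    let n : Int := (symbs.length : Int)
    let init := (PySem.List.pyRange 0 (min n (first_index_max + 1)) 1).map (fun j => [j])
    -- Python 'if not prefixes: break': once empty the state stays empty, so ported as identity on []
    let prefixes := (List.range (to_fill - 1).toNat).foldl
      (fun ps _ => if ps = [] then ps else altExtend n ps) init
    prefixes.map (fun p => p.map (fun i => PySem.List.pyGetD symbs i 0))

-- ===== PRECONDITION & SPEC =====
-- Pre_ excludes only to_fill < 0 with nonempty symbs and first_index_max ≥ 0: there
-- Python A recurses without a base case and raises RecursionError (it returns no value).
def Pre_all_firsts (symbs : List Int) (to_fill : Int) (first_index_max : Int) : Prop :=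
  0 ≤ to_fill ∨ symbs = [] ∨ first_index_max < 0
instance (symbs : List Int) (to_fill : Int) (first_index_max : Int) : Decidable (Pre_all_firsts symbs to_fill first_index_max) := by unfold Pre_all_firsts; infer_instance

def pvWitness_all_firsts : List Int × Int × Int := ([5, 6, 7], 3, 1)

def Spec_all_firsts (symbs : List Int) (to_fill : Int) (first_index_max : Int) (out : List (List Int)) : Prop := out = all_firsts_alt symbs to_fill first_index_max
instance (symbs : List Int) (to_fill : Int) (first_index_max : Int) (out : List (List Int)) : Decidable (Spec_all_firsts symbs to_fill first_index_max out) := by unfold Spec_all_firsts; infer_instance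

-- ===== CLAIM (what is proved, stated in full; the proofs are below) =====
def Claim_equal_all_firsts : Prop := ∀ (symbs : List Int) (to_fill : Int) (first_index_max : Int), Dom_all_firsts symbs to_fill first_index_max → Pre_all_firsts symbs to_fill first_index_max → Spec_all_firsts symbs to_fill first_index_max (all_firsts symbs to_fill first_index_max)

-- ===== LEMMAS AND PROOFS =====

-- index-sequence semantics shared by both ports: chains of absolute indices into symbs,
-- starting at off + i for i < min (n - off) (fim + 1), each later step +0 or +1, all < n
def pvF (n off fim : Int) : Nat → List (List Int)
  | 0 => [[]]
  | t + 1 => (PySem.List.pyRange 0 (min (n - off) (fim + 1)) 1).flatMap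
      (fun i => (pvF n (off + i) 1 t).map (fun x => (off + i) :: x))

lemma pv_flatMap_congr {α β : Type} {l : List α} {f g : α → List β}
    (h : ∀ x ∈ l, f x = g x) : l.flatMap f = l.flatMap g := by
  induction l with
  | nil => rfl
  | cons a l ih =>
    simp only [List.flatMap_cons]
    rw [h a (by simp), ih (fun x hx => h x (by simp [hx]))]

lemma pv_auxA (symbs : List Int) : ∀ (t fuel : Nat) (off fim : Int),
    t + 1 ≤ fuel → 0 ≤ off → off < (symbs.length : Int) →
    all_firstsAux fuel (symbs.drop off.toNat) (t : Int) fim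
      = (pvF (symbs.length : Int) off fim t).map
          (fun seq => seq.map (fun i => PySem.List.pyGetD symbs i 0)) := by
  intro t
  induction t with
  | zero =>
    intro fuel off fim hf _ _
    match fuel, hf with
    | fuel' + 1, _ => simp [all_firstsAux, pvF]
  | succ t ih =>
    intro fuel off fim hf hoff hofflt
    match fuel, hf with
    | fuel' + 1, hf =>
      have hne : symbs.drop off.toNat ≠ [] := by
        intro h
        have := congrArg List.length h
        simp at this
        omega
      have hcast : ((t : Int) + 1) ≠ 0 := by omega
      have hlen : (((symbs.drop off.toNat).length : Nat) : Int) = (symbs.length : Int) - off := by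
        simp [List.length_drop]; omega
      simp only [all_firstsAux, Nat.cast_add, Nat.cast_one, if_neg hcast, if_neg hne]
      rw [PySem.List.foldl_append_eq_flatMap, List.nil_append, hlen]
      simp only [pvF, List.map_flatMap]
      apply pv_flatMap_congr
      intro i hi
      rw [PySem.List.mem_pyRange_one] at hi
      obtain ⟨hi0, hi1⟩ := hi
      have hilt : i < (symbs.length : Int) - off := lt_of_lt_of_le hi1 (min_le_left _ _)
      have htn : (off + i).toNat = off.toNat + i.toNat := by omega
      have hsl : PySem.List.slice (symbs.drop off.toNat) (some i) none
          = symbs.drop (off + i).toNat := by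
        rw [PySem.List.slice_from _ hi0, List.drop_drop, htn, Nat.add_comm]
      have hget : PySem.List.pyGetD (symbs.drop off.toNat) i 0
          = PySem.List.pyGetD symbs (off + i) 0 := by
        rw [PySem.List.pyGetD_eq_getElem _ _ hi0 (by rwa [hlen]),
            PySem.List.pyGetD_eq_getElem _ _ (by omega) (by omega)]
        rw [List.getElem_drop]
        congr 1
        omega
      have hIH := ih fuel' (off + i) 1 (by omega) (by omega) (by omega)
      have h1 : ((t : Nat) : Int) + 1 - 1 = ((t : Nat) : Int) := by ring
      rw [hsl, h1, hIH, hget, List.map_map, List.map_map]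
      rfl

lemma pv_iter_nil (n : Int) (t : Nat) : (altExtend n)^[t] [] = [] := by
  induction t with
  | zero => rfl
  | succ t ih => rw [Function.iterate_succ_apply]; simpa [altExtend] using ih

lemma pv_iter_append (n : Int) : ∀ (t : Nat) (ps qs : List (List Int)),
    (altExtend n)^[t] (ps ++ qs) = (altExtend n)^[t] ps ++ (altExtend n)^[t] qs := by
  intro t
  induction t with
  | zero => intro ps qs; rfl
  | succ t ih =>
    intro ps qs
    rw [Function.iterate_succ_apply, Function.iterate_succ_apply, Function.iterate_succ_apply]
    rw [show altExtend n (ps ++ qs) = altExtend n ps ++ altExtend n qs from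
      List.flatMap_append, ih]

lemma pv_iter_flatMap (n : Int) (t : Nat) : ∀ (ps : List (List Int)),
    (altExtend n)^[t] ps = ps.flatMap (fun p => (altExtend n)^[t] [p]) := by
  intro ps
  induction ps with
  | nil => simp [pv_iter_nil]
  | cons p rest ih =>
    rw [show (p :: rest) = [p] ++ rest from rfl, pv_iter_append, ih]
    simp

lemma pv_iter_singleton (n : Int) : ∀ (t : Nat) (p : List Int) (j : Int),
    p ≠ [] → p.getLast? = some j → 0 ≤ j → j < n →
    (altExtend n)^[t] [p] = (pvF n j 1 t).map (fun s => p ++ s) := by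
  intro t
  induction t with
  | zero => intro p j _ _ _ _; simp [pvF]
  | succ t ih =>
    intro p j hp hlast hj0 hjn
    have hget : PySem.List.pyGetD p (-1) 0 = j := by
      rw [PySem.List.pyGetD_neg_one p 0 hp]
      exact Option.some_injective _ (by rw [← hlast, List.getLast?_eq_some_getLast hp])
    have hstep : altExtend n [p]
        = [p ++ [j]] ++ (if j + 1 < n then [p ++ [j + 1]] else []) := by
      simp only [altExtend, List.flatMap_cons, List.flatMap_nil, List.append_nil,
        List.filterMap_cons, List.filterMap_nil, hget, add_zero]
      rw [if_pos hjn]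
      by_cases h2 : j + 1 < n
      · simp [h2]
      · simp [h2]

    rw [Function.iterate_succ_apply, hstep]
    by_cases h2 : j + 1 < n
    · rw [if_pos h2, pv_iter_append,
        ih (p ++ [j]) j (by simp) (by simp) hj0 hjn,
        ih (p ++ [j + 1]) (j + 1) (by simp) (by simp) (by omega) h2]
      have hmin : min (n - j) (1 + 1) = 2 := by omega
      rw [pvF, hmin, show PySem.List.pyRange 0 2 1 = [0, 1] from by decide]
      simp [List.map_map, Function.comp_def]
    · rw [if_neg h2, List.append_nil, ih (p ++ [j]) j (by simp) (by simp) hj0 hjn]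
      have hmin : min (n - j) (1 + 1) = 1 := by omega
      rw [pvF, hmin, show PySem.List.pyRange 0 1 1 = [0] from by decide]
      simp [List.map_map, Function.comp_def]

lemma pv_foldl_const {α : Type} (e : α → α) (t : Nat) (init : α) :
    (List.range t).foldl (fun x _ => e x) init = e^[t] init := by
  induction t with
  | zero => rfl
  | succ t ih =>
    rw [List.range_succ, List.foldl_append, ih, Function.iterate_succ_apply']
    rfl

-- ===== VERDICT (by name: the statement is the Claim_ definition above) =====
theorem all_firsts_spec : Claim_equal_all_firsts := by
  intro symbs to_fill fim _ hpre
  unfold Spec_all_firsts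
  by_cases ht0 : to_fill = 0
  · subst ht0; simp [all_firsts, all_firstsAux, all_firsts_alt]
  · by_cases hs : symbs = []
    · subst hs; simp [all_firsts, all_firstsAux, all_firsts_alt, ht0]
    · by_cases htf : 0 ≤ to_fill
      swap
      · -- to_fill < 0, symbs ≠ [], so first_index_max < 0: both enumerate an empty range
        have hfim : fim < 0 := by
          rcases hpre with h | h | h
          · exact absurd h htf
          · exact absurd h hs
          · exact h
        have hr : PySem.List.pyRange 0 (min ((symbs.length : Int)) (fim + 1)) 1 = [] :=
          PySem.List.pyRange_one_eq_nil (by omega)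
        have hB0 : all_firsts_alt symbs to_fill fim = [] := by
          simp only [all_firsts_alt, if_neg ht0, if_neg hs]
          rw [hr]
          simp only [List.map_nil]
          have : ∀ k : Nat, (List.range k).foldl
              (fun (ps : List (List Int)) (_ : Nat) =>
                if ps = [] then ps else altExtend (symbs.length : Int) ps) [] = [] := by
            intro k
            induction k with
            | zero => rfl
            | succ k ihk => rw [List.range_succ, List.foldl_append, ihk]; rfl
          rw [this]
          rfl
        have hA0 : all_firsts symbs to_fill fim = [] := by
          simp only [all_firsts, all_firstsAux, if_neg ht0, if_neg hs]
          rw [hr]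
          rfl
        rw [hA0, hB0]
      obtain ⟨t, rfl⟩ : ∃ t : Nat, to_fill = (t : Int) := ⟨to_fill.toNat, by omega⟩
      obtain ⟨t', rfl⟩ : ∃ t' : Nat, t = t' + 1 := by
        cases t with
        | zero => exact absurd rfl ht0
        | succ t' => exact ⟨t', rfl⟩
      have hn : (0 : Int) < (symbs.length : Int) := by
        have : symbs.length ≠ 0 := by simpa [List.length_eq_zero_iff] using hs
        omega
      -- A side
      have hA : all_firsts symbs ((t' + 1 : Nat) : Int) fim
          = (pvF (symbs.length : Int) 0 fim (t' + 1)).map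
              (fun seq => seq.map (fun i => PySem.List.pyGetD symbs i 0)) := by
        have := pv_auxA symbs (t' + 1) (((t' + 1 : Nat) : Int).toNat + 1) 0 fim
          (by omega) le_rfl hn
        simpa [all_firsts] using this
      -- B side
      have hB : all_firsts_alt symbs ((t' + 1 : Nat) : Int) fim
          = (PySem.List.pyRange 0 (min (symbs.length : Int) (fim + 1)) 1).flatMap
              (fun j => ((pvF (symbs.length : Int) j 1 t').map (fun x => j :: x)).map
                (fun seq => seq.map (fun i => PySem.List.pyGetD symbs i 0))) := by
        have hcast : (((t' + 1 : Nat) : Int)) ≠ 0 := by omega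
        have htn : ((((t' + 1 : Nat) : Int)) - 1).toNat = t' := by omega
        have hfun : (fun (ps : List (List Int)) (_ : Nat) =>
            if ps = [] then ps else altExtend (symbs.length : Int) ps)
            = (fun ps _ => altExtend (symbs.length : Int) ps) := by
          funext ps k
          by_cases h : ps = []
          · subst h; simp [altExtend]
          · rw [if_neg h]
        simp only [all_firsts_alt, if_neg hcast, if_neg hs]
        rw [htn, hfun, pv_foldl_const, pv_iter_flatMap, List.flatMap_map, List.map_flatMap]
        apply pv_flatMap_congr
        intro j hj
        rw [PySem.List.mem_pyRange_one] at hj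
        obtain ⟨hj0, hj1⟩ := hj
        have hjn : j < (symbs.length : Int) := lt_of_lt_of_le hj1 (min_le_left _ _)
        rw [pv_iter_singleton (symbs.length : Int) t' [j] j (by simp) (by simp) hj0 hjn]
        simp [List.map_map, Function.comp_def]
      rw [hA, hB, pvF, List.map_flatMap]
      apply pv_flatMap_congr
      intro j hj
      simp [List.map_map, Function.comp_def]
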